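-- pv_equiv track=rewrite | github.com/rexxar-liang/24points | point/caculator/answer.py | gen_possible_numbers
-- ===== SOURCE A (Python) =====
-- possible_number_index = [(0, 1, 2, 3),
--                          (0, 1, 3, 2),
--                          (0, 2, 1, 3),
--                          (0, 2, 3, 1),
--                          (0, 3, 1, 2),
--                          (0, 3, 2, 1),
--                          (1, 0, 2, 3),
--                          (1, 0, 3, 2),
--                          (1, 2, 0, 3),
--                          (1, 2, 3, 0),
--                          (1, 3, 0, 2),
--                          (1, 3, 2, 0),
--                          (2, 0, 1, 3),
--                          (2, 0, 3, 1),
--                          (2, 1, 0, 3),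
--                          (2, 1, 3, 0),
--                          (2, 3, 0, 1),
--                          (2, 3, 1, 0),
--                          (3, 0, 1, 2),
--                          (3, 0, 2, 1),
--                          (3, 1, 0, 2),
--                          (3, 1, 2, 0),
--                          (3, 2, 0, 1),
--                          (3, 2, 1, 0)
--                          ]
--
-- def gen_possible_numbers(number1, number2, number3, number4):
--     possible_numbers = []
--     numbers = [number1, number2, number3, number4]
--     for possible_index in possible_number_index:
--         possible_number = (numbers[possible_index[0]],
--                            numbers[possible_index[1]],
--                            numbers[possible_index[2]],
--                            numbers[possible_index[3]]
--                            )
--         if possible_number not in possible_numbers: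
--             possible_numbers.append(possible_number)
--     return possible_numbers
-- ===== SOURCE B (Python) =====
-- def _perms(remaining):
--     # distinct permutations of `remaining`, in positional order, each produced once:
--     # at every level skip a candidate value that was already branched on at this level
--     if not remaining:
--         return [[]]
--     result = []
--     used = []
--     for i, x in enumerate(remaining):
--         if x in used:
--             continue
--         used.append(x)
--         rest = remaining[:i] + remaining[i + 1:]
--         for tail in _perms(rest):
--             result.append([x] + tail)
--     return result
--
--
-- def gen_possible_numbers(number1, number2, number3, number4):
--     return [tuple(p) for p in _perms([number1, number2, number3, number4])]
-- ===== Notes on version B (the rewrite author's own statement) =====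
-- stated objective: alternative
-- what changed: Replaces the static 24-entry index table and the membership-test dedup over the output list by a recursive backtracking permutation generator that prunes duplicate value choices at each level, so each distinct permutation is emitted exactly once in the same first-occurrence order and no dedup pass is needed.
import Mathlib
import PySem

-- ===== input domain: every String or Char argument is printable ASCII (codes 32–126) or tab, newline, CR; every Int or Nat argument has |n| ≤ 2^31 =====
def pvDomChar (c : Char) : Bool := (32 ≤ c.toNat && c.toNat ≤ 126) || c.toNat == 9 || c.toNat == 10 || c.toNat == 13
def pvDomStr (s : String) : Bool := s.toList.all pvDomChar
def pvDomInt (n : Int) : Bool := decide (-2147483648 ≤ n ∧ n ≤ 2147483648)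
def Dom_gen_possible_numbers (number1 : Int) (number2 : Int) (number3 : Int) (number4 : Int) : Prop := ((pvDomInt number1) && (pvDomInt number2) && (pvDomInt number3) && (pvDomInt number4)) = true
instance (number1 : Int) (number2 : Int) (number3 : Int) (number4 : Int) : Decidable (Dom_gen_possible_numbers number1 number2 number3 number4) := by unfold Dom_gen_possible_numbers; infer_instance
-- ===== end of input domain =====

-- B replaces A's static 24-entry index table plus output-membership dedup by a recursive
-- backtracking generator that prunes duplicate branches at each level, so every distinct
-- permutation is produced exactly once and no dedup pass over the output is needed;
-- objective: alternative.

-- ===== PORT A =====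
def possible_number_index : List (Int × Int × Int × Int) :=
  [(0, 1, 2, 3), (0, 1, 3, 2), (0, 2, 1, 3), (0, 2, 3, 1), (0, 3, 1, 2), (0, 3, 2, 1),
   (1, 0, 2, 3), (1, 0, 3, 2), (1, 2, 0, 3), (1, 2, 3, 0), (1, 3, 0, 2), (1, 3, 2, 0),
   (2, 0, 1, 3), (2, 0, 3, 1), (2, 1, 0, 3), (2, 1, 3, 0), (2, 3, 0, 1), (2, 3, 1, 0),
   (3, 0, 1, 2), (3, 0, 2, 1), (3, 1, 0, 2), (3, 1, 2, 0), (3, 2, 0, 1), (3, 2, 1, 0)]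

-- numbers[possible_index[k]]: index is always a literal 0..3 into a 4-list, so pyGetD is exact
def gen_possible_numbers (number1 : Int) (number2 : Int) (number3 : Int) (number4 : Int) : List (Int × Int × Int × Int) :=
  let numbers := [number1, number2, number3, number4]
  possible_number_index.foldl
    (fun possible_numbers possible_index =>
      let possible_number :=
        (PySem.List.pyGetD numbers possible_index.1 0,
         PySem.List.pyGetD numbers possible_index.2.1 0,
         PySem.List.pyGetD numbers possible_index.2.2.1 0,
         PySem.List.pyGetD numbers possible_index.2.2.2 0)
      if possible_number ∈ possible_numbers then possible_numbers
      else possible_numbers ++ [possible_number])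
    []

-- ===== PORT B =====
-- _perms from Source B; the Nat fuel (= length of `remaining` at the call) only makes the
-- recursion structurally total, it never cuts a branch Python takes
def pvPerms : Nat → List Int → List (List Int)
  | _, [] => [[]]
  | 0, _ :: _ => []
  | Nat.succ f, remaining =>
    ((PySem.List.enumerate remaining 0).foldl
      (fun (st : List (List Int) × List Int) ix =>
        if ix.2 ∈ st.2 then st
        else
          let rest := PySem.List.slice remaining none (some ix.1) ++
                      PySem.List.slice remaining (some (ix.1 + 1)) none
          ((pvPerms f rest).foldl (fun result tail => result ++ [ix.2 :: tail]) st.1,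
           st.2 ++ [ix.2]))
      ([], [])).1

-- tuple(p) for a 4-element list; other arities never occur
def pvTup4 (l : List Int) : Int × Int × Int × Int :=
  match l with
  | [a, b, c, d] => (a, b, c, d)
  | _ => (0, 0, 0, 0)

def gen_possible_numbers_alt (number1 : Int) (number2 : Int) (number3 : Int) (number4 : Int) : List (Int × Int × Int × Int) :=
  (pvPerms 4 [number1, number2, number3, number4]).map pvTup4

-- ===== PRECONDITION & SPEC =====
def Spec_gen_possible_numbers (number1 : Int) (number2 : Int) (number3 : Int) (number4 : Int) (out : List (Int × Int × Int × Int)) : Prop := out = gen_possible_numbers_alt number1 number2 number3 number4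
instance (number1 : Int) (number2 : Int) (number3 : Int) (number4 : Int) (out : List (Int × Int × Int × Int)) : Decidable (Spec_gen_possible_numbers number1 number2 number3 number4 out) := by unfold Spec_gen_possible_numbers; infer_instance

-- ===== CLAIM =====
def Claim_equal_gen_possible_numbers : Prop := ∀ (number1 : Int) (number2 : Int) (number3 : Int) (number4 : Int), Dom_gen_possible_numbers number1 number2 number3 number4 → Spec_gen_possible_numbers number1 number2 number3 number4 (gen_possible_numbers number1 number2 number3 number4)

-- ===== LEMMAS AND PROOFS =====

-- ===== VERDICT =====
set_option maxHeartbeats 1000000 in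
theorem gen_possible_numbers_spec : Claim_equal_gen_possible_numbers := by
  intro n1 n2 n3 n4 _
  unfold Spec_gen_possible_numbers
  by_cases h12 : n1 = n2 <;> by_cases h13 : n1 = n3 <;> by_cases h14 : n1 = n4 <;>
    by_cases h23 : n2 = n3 <;> by_cases h24 : n2 = n4 <;> by_cases h34 : n3 = n4 <;>
    subst_vars <;>
    (try exact absurd rfl (by assumption)) <;>
    (try have s12 := Ne.symm h12) <;> (try have s13 := Ne.symm h13) <;>
    (try have s14 := Ne.symm h14) <;> (try have s23 := Ne.symm h23) <;>
    (try have s24 := Ne.symm h24) <;> (try have s34 := Ne.symm h34) <;>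
    simp [gen_possible_numbers, gen_possible_numbers_alt, possible_number_index,
      pvPerms, pvTup4, PySem.List.pyGetD, PySem.List.enumerate, PySem.List.slice, *]
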